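-- pv_equiv track=rewrite | github.com/Nithya1363/CRT-technical-practice-python | Homework/matrix pattern.py | generate_pattern_matrix
-- ===== SOURCE A (Python) =====
-- def generate_pattern_matrix(N):
--     # Initialize the matrix
--     matrix = [[0] * N for _ in range(N)]
--
--     # Fill the matrix with the desired pattern
--     for i in range(N):
--         for j in range(N):
--             # Calculate the element value
--             if i == 0 and j == 0:
--                 matrix[i][j] = 1
--             elif i == 0:
--                 matrix[i][j] = matrix[i][j-1] + (j + 1)
--             elif j == 0:
--                 matrix[i][j] = matrix[i-1][j] + (i + 1)
--             else:
--                 matrix[i][j] = matrix[i-1][j] + matrix[i][j-1] - matrix[i-1][j-1] + (i + j + 1)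
--
--     return matrix
-- ===== SOURCE B (Python) =====
-- def _cell(i, j):
--     return (j + 1) * i * (i + 1) // 2 + (i + 1) * j * (j + 1) // 2 + (i + 1) * (j + 1)
--
--
-- def generate_pattern_matrix(N):
--     return [[_cell(i, j) for j in range(N)] for i in range(N)]
-- ===== Notes on version B (the rewrite author's own statement) =====
-- stated objective: simpler
-- what changed: Replaced the 2D inclusion-exclusion DP recurrence (each cell computed from three previously filled neighbours) by an independent per-cell closed form (j+1)*i*(i+1)//2 + (i+1)*j*(j+1)//2 + (i+1)*(j+1).
import Mathlib
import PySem

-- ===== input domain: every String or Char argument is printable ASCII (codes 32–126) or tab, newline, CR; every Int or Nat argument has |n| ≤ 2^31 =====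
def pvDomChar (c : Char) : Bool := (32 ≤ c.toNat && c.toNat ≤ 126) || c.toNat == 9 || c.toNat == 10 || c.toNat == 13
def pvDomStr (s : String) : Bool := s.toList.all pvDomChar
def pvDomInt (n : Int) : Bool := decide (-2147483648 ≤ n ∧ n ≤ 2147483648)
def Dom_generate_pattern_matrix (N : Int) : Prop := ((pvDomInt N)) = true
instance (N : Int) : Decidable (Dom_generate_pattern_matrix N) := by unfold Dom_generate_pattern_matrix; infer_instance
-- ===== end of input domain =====

-- B replaces A's 2D inclusion-exclusion recurrence with an independent per-cell closed form (simpler).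

-- ===== PORT A =====
-- one body of A's inner loop: computes the new cell value and writes matrix[i][j] = v
def pvStepA (matrix : List (List Int)) (i j : Int) : List (List Int) :=
  PySem.List.pySetD matrix i (PySem.List.pySetD (PySem.List.pyGetD matrix i []) j
    (if i = 0 ∧ j = 0 then 1
     else if i = 0 then PySem.List.pyGetD (PySem.List.pyGetD matrix i []) (j - 1) 0 + (j + 1)
     else if j = 0 then PySem.List.pyGetD (PySem.List.pyGetD matrix (i - 1) []) j 0 + (i + 1)
     else PySem.List.pyGetD (PySem.List.pyGetD matrix (i - 1) []) j 0
          + PySem.List.pyGetD (PySem.List.pyGetD matrix i []) (j - 1) 0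
          - PySem.List.pyGetD (PySem.List.pyGetD matrix (i - 1) []) (j - 1) 0
          + (i + j + 1)))

def generate_pattern_matrix (N : Int) : List (List Int) :=
  let matrix := (PySem.List.pyRange 0 N 1).map (fun _ => PySem.List.pyRepeat [(0 : Int)] N)
  (PySem.List.pyRange 0 N 1).foldl (fun m i =>
    (PySem.List.pyRange 0 N 1).foldl (fun m j => pvStepA m i j) m) matrix

-- ===== PORT B =====
-- port of Source B's _cell
def pvCell (i j : Int) : Int :=
  PySem.Int.floordiv ((j + 1) * i * (i + 1)) 2 + PySem.Int.floordiv ((i + 1) * j * (j + 1)) 2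
    + (i + 1) * (j + 1)

def generate_pattern_matrix_alt (N : Int) : List (List Int) :=
  (PySem.List.pyRange 0 N 1).map (fun i => (PySem.List.pyRange 0 N 1).map (fun j => pvCell i j))

-- ===== PRECONDITION & SPEC =====
def Spec_generate_pattern_matrix (N : Int) (out : List (List Int)) : Prop := out = generate_pattern_matrix_alt N
instance (N : Int) (out : List (List Int)) : Decidable (Spec_generate_pattern_matrix N out) := by unfold Spec_generate_pattern_matrix; infer_instance

-- ===== CLAIM (what is proved, stated in full; the proofs are below) =====
def Claim_equal_generate_pattern_matrix : Prop := ∀ (N : Int), Dom_generate_pattern_matrix N → Spec_generate_pattern_matrix N (generate_pattern_matrix N)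

-- ===== LEMMAS AND PROOFS =====

-- the fully-filled row i
def pvRowF (N i : Int) : List Int := (PySem.List.pyRange 0 N 1).map (fun j => pvCell i j)

-- row a filled up to (not including) column b
def pvProw (N a b : Int) : List Int :=
  (PySem.List.pyRange 0 N 1).map (fun j => if j < b then pvCell a j else 0)

-- the matrix state: rows < a done, row a partially done up to column b, rest zero
def pvIst (N a b : Int) : List (List Int) :=
  (PySem.List.pyRange 0 N 1).map (fun i =>
    if i < a then pvRowF N i else if i = a then pvProw N a b else List.replicate N.toNat 0)

-- doubling lemma: 2 * pvCell i j is the polynomial, since both // 2 arguments are even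
lemma pvCell_double (i j : Int) :
    2 * pvCell i j = (j + 1) * i * (i + 1) + (i + 1) * j * (j + 1) + 2 * ((i + 1) * (j + 1)) := by
  have h1 : (2 : Int) ∣ (j + 1) * i * (i + 1) := by
    have := Int.even_mul_succ_self i
    obtain ⟨k, hk⟩ := this
    exact ⟨(j + 1) * k, by rw [mul_assoc]; rw [hk]; ring⟩
  have h2 : (2 : Int) ∣ (i + 1) * j * (j + 1) := by
    have := Int.even_mul_succ_self j
    obtain ⟨k, hk⟩ := this
    exact ⟨(i + 1) * k, by rw [mul_assoc]; rw [hk]; ring⟩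
  unfold pvCell
  rw [PySem.Int.floordiv_eq_ediv_of_pos (by norm_num), PySem.Int.floordiv_eq_ediv_of_pos (by norm_num)]
  have e1 := Int.mul_ediv_cancel' h1
  have e2 := Int.mul_ediv_cancel' h2
  linarith

lemma pvCell_00 : pvCell 0 0 = 1 := by decide

lemma pvCell_top (j : Int) (hj : 0 < j) : pvCell 0 j = pvCell 0 (j - 1) + (j + 1) := by
  have e1 := pvCell_double 0 j
  have e2 := pvCell_double 0 (j - 1)
  have : (j + 1) * 0 * (0 + 1) + (0 + 1) * j * (j + 1) + 2 * ((0 + 1) * (j + 1))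
      = ((j - 1 + 1) * 0 * (0 + 1) + (0 + 1) * (j - 1) * (j - 1 + 1) + 2 * ((0 + 1) * (j - 1 + 1)))
        + 2 * (j + 1) := by ring
  linarith

lemma pvCell_left (i : Int) (hi : 0 < i) : pvCell i 0 = pvCell (i - 1) 0 + (i + 1) := by
  have e1 := pvCell_double i 0
  have e2 := pvCell_double (i - 1) 0
  have : (0 + 1) * i * (i + 1) + (i + 1) * 0 * (0 + 1) + 2 * ((i + 1) * (0 + 1))
      = ((0 + 1) * (i - 1) * (i - 1 + 1) + (i - 1 + 1) * 0 * (0 + 1) + 2 * ((i - 1 + 1) * (0 + 1)))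
        + 2 * (i + 1) := by ring
  linarith

lemma pvCell_mid (i j : Int) (hi : 0 < i) (hj : 0 < j) :
    pvCell i j = pvCell (i - 1) j + pvCell i (j - 1) - pvCell (i - 1) (j - 1) + (i + j + 1) := by
  have e1 := pvCell_double i j
  have e2 := pvCell_double (i - 1) j
  have e3 := pvCell_double i (j - 1)
  have e4 := pvCell_double (i - 1) (j - 1)
  have : (j + 1) * i * (i + 1) + (i + 1) * j * (j + 1) + 2 * ((i + 1) * (j + 1))
      = ((j + 1) * (i - 1) * (i - 1 + 1) + (i - 1 + 1) * j * (j + 1) + 2 * ((i - 1 + 1) * (j + 1)))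
        + ((j - 1 + 1) * i * (i + 1) + (i + 1) * (j - 1) * (j - 1 + 1) + 2 * ((i + 1) * (j - 1 + 1)))
        - ((j - 1 + 1) * (i - 1) * (i - 1 + 1) + (i - 1 + 1) * (j - 1) * (j - 1 + 1)
            + 2 * ((i - 1 + 1) * (j - 1 + 1)))
        + 2 * (i + j + 1) := by ring
  linarith

-- setting one entry of a map over a range
set_option maxRecDepth 4000 in
lemma set_map_pyRange {α : Type} (g : Int → α) (N b : Int) (v : α) (hb : 0 ≤ b) (hbN : b < N) :
    ((PySem.List.pyRange 0 N 1).map g).set b.toNat v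
      = (PySem.List.pyRange 0 N 1).map (fun j => if j = b then v else g j) := by
  apply List.ext_getElem
  · simp
  · intro k h1 h2
    have hlen : k < (PySem.List.pyRange 0 N 1).length := by simpa using h2
    have hk : (PySem.List.pyRange 0 N 1)[k] = 0 + (k : Int) :=
      PySem.List.getElem_pyRange_one 0 N k hlen
    rw [List.getElem_map, hk]
    by_cases h : b.toNat = k
    · subst h
      rw [List.getElem_set_self (by simpa using hlen)]
      rw [if_pos (show (0 : Int) + ((b.toNat : Nat) : Int) = b by omega)]
    · rw [List.getElem_set_ne h, List.getElem_map, hk,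
        if_neg (show ¬((0 : Int) + (k : Int) = b) by omega)]

lemma pvGet_ist (N a b i : Int) (hi : 0 ≤ i) (hiN : i < N) :
    PySem.List.pyGetD (pvIst N a b) i []
      = (if i < a then pvRowF N i else if i = a then pvProw N a b else List.replicate N.toNat 0) := by
  unfold pvIst
  rw [PySem.List.pyGetD_map_pyRange_of_nonneg _ N i [] hi hiN]

lemma pvGet_rowF (N i j : Int) (hj : 0 ≤ j) (hjN : j < N) :
    PySem.List.pyGetD (pvRowF N i) j 0 = pvCell i j := by
  unfold pvRowF
  rw [PySem.List.pyGetD_map_pyRange_of_nonneg _ N j 0 hj hjN]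

lemma pvGet_prow (N a b j : Int) (hj : 0 ≤ j) (hjN : j < N) :
    PySem.List.pyGetD (pvProw N a b) j 0 = if j < b then pvCell a j else 0 := by
  unfold pvProw
  rw [PySem.List.pyGetD_map_pyRange_of_nonneg _ N j 0 hj hjN]

lemma pvProw_zero (N a : Int) : pvProw N a 0 = List.replicate N.toNat 0 := by
  unfold pvProw
  rw [List.map_congr_left (g := fun _ => (0 : Int))
    (by intro j hj; rw [if_neg]; have := (PySem.List.mem_pyRange_one.mp hj).1; omega)]
  rw [List.map_const']
  simp [PySem.List.length_pyRange_one]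

-- one inner-loop step moves pvIst N a b to pvIst N a (b+1)
lemma pvStepA_ist (N a b : Int) (ha : 0 ≤ a) (haN : a < N) (hb : 0 ≤ b) (hbN : b < N) :
    pvStepA (pvIst N a b) a b = pvIst N a (b + 1) := by
  unfold pvStepA
  have grow : PySem.List.pyGetD (pvIst N a b) a [] = pvProw N a b := by
    rw [pvGet_ist N a b a ha haN]; simp
  rw [grow]
  have hv :
      (if a = 0 ∧ b = 0 then (1 : Int)
       else if a = 0 then PySem.List.pyGetD (pvProw N a b) (b - 1) 0 + (b + 1)
       else if b = 0 then PySem.List.pyGetD (PySem.List.pyGetD (pvIst N a b) (a - 1) []) b 0 + (a + 1)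
       else PySem.List.pyGetD (PySem.List.pyGetD (pvIst N a b) (a - 1) []) b 0
            + PySem.List.pyGetD (pvProw N a b) (b - 1) 0
            - PySem.List.pyGetD (PySem.List.pyGetD (pvIst N a b) (a - 1) []) (b - 1) 0
            + (a + b + 1)) = pvCell a b := by
    by_cases h00 : a = 0 ∧ b = 0
    · rw [if_pos h00, h00.1, h00.2, pvCell_00]
    · rw [if_neg h00]
      by_cases ha0 : a = 0
      · have hb0 : 0 < b := by omega
        rw [if_pos ha0, pvGet_prow N a b (b - 1) (by omega) (by omega),
          if_pos (by omega), ha0, pvCell_top b hb0]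
      · rw [if_neg ha0]
        have hprev : PySem.List.pyGetD (pvIst N a b) (a - 1) [] = pvRowF N (a - 1) := by
          rw [pvGet_ist N a b (a - 1) (by omega) (by omega), if_pos (by omega)]
        by_cases hb0 : b = 0
        · rw [if_pos hb0, hprev, pvGet_rowF N (a - 1) b hb hbN, hb0,
            pvCell_left a (by omega)]
        · rw [if_neg hb0, hprev,
            pvGet_rowF N (a - 1) b hb hbN,
            pvGet_prow N a b (b - 1) (by omega) (by omega), if_pos (by omega),
            pvGet_rowF N (a - 1) (b - 1) (by omega) (by omega),
            pvCell_mid a b (by omega) (by omega)]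
  rw [hv]
  have hsetrow : PySem.List.pySetD (pvProw N a b) b (pvCell a b) = pvProw N a (b + 1) := by
    rw [PySem.List.pySetD_of_nonneg _ _ hb]
    unfold pvProw
    rw [set_map_pyRange _ N b _ hb hbN]
    apply List.map_congr_left
    intro j hj
    by_cases hjb : j = b
    · rw [if_pos hjb, if_pos (by omega), hjb]
    · rw [if_neg hjb]
      by_cases hlt : j < b
      · rw [if_pos hlt, if_pos (by omega)]
      · rw [if_neg hlt, if_neg (by omega)]
  rw [hsetrow, PySem.List.pySetD_of_nonneg _ _ ha]
  unfold pvIst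
  rw [set_map_pyRange _ N a _ ha haN]
  apply List.map_congr_left
  intro i hi
  by_cases hia : i = a
  · rw [if_pos hia, if_neg (by omega), if_pos hia]
  · rw [if_neg hia]
    by_cases hlt : i < a
    · rw [if_pos hlt, if_pos hlt]
    · rw [if_neg hlt, if_neg hlt, if_neg hia, if_neg hia]

-- the whole inner loop from column b fills row a completely
lemma inner_fold (N a : Int) (ha : 0 ≤ a) (haN : a < N) :
    ∀ (k : Nat) (b : Int), 0 ≤ b → b + (k : Int) = N →
    (PySem.List.pyRange b N 1).foldl (fun m j => pvStepA m a j) (pvIst N a b) = pvIst N a N := by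
  intro k
  induction k with
  | zero =>
    intro b hb hbk
    rw [PySem.List.pyRange_one_eq_nil (a := b) (b := N) (by omega)]
    simp only [List.foldl_nil]
    congr 1
    omega
  | succ n ih =>
    intro b hb hbk
    rw [PySem.List.pyRange_one_cons (a := b) (b := N) (by omega)]
    simp only [List.foldl_cons]
    rw [pvStepA_ist N a b ha haN hb (by omega)]
    exact ih (b + 1) (by omega) (by omega)

lemma ist_succ (N a : Int) (ha : 0 ≤ a) (haN : a < N) : pvIst N a N = pvIst N (a + 1) 0 := by
  unfold pvIst
  apply List.map_congr_left
  intro i hi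
  have hmem := PySem.List.mem_pyRange_one.mp hi
  by_cases hia : i = a
  · rw [if_neg (by omega), if_pos hia, if_pos (by omega), hia]
    unfold pvProw pvRowF
    apply List.map_congr_left
    intro j hj
    rw [if_pos (PySem.List.mem_pyRange_one.mp hj).2]
  · by_cases hlt : i < a
    · rw [if_pos hlt, if_pos (by omega)]
    · rw [if_neg hlt, if_neg hia, if_neg (show ¬(i < a + 1) by omega)]
      by_cases hia1 : i = a + 1
      · rw [if_pos hia1, pvProw_zero]
      · rw [if_neg hia1]

lemma outer_fold (N : Int) :
    ∀ (k : Nat) (a : Int), 0 ≤ a → a + (k : Int) = N →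
    (PySem.List.pyRange a N 1).foldl
      (fun m i => (PySem.List.pyRange 0 N 1).foldl (fun m j => pvStepA m i j) m) (pvIst N a 0)
      = pvIst N N 0 := by
  intro k
  induction k with
  | zero =>
    intro a ha hak
    rw [PySem.List.pyRange_one_eq_nil (a := a) (b := N) (by omega)]
    simp only [List.foldl_nil]
    congr 1
    omega
  | succ n ih =>
    intro a ha hak
    rw [PySem.List.pyRange_one_cons (a := a) (b := N) (by omega)]
    simp only [List.foldl_cons]
    rw [show (PySem.List.pyRange 0 N 1).foldl (fun m j => pvStepA m a j) (pvIst N a 0) = pvIst N a N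
      from inner_fold N a ha (by omega) N.toNat 0 le_rfl (by omega)]
    rw [ist_succ N a ha (by omega)]
    exact ih (a + 1) (by omega) (by omega)

lemma init_eq_ist (N : Int) :
    (PySem.List.pyRange 0 N 1).map (fun _ => PySem.List.pyRepeat [(0 : Int)] N) = pvIst N 0 0 := by
  unfold pvIst
  apply List.map_congr_left
  intro i hi
  have hmem := PySem.List.mem_pyRange_one.mp hi
  rw [PySem.List.pyRepeat_singleton]
  by_cases h0 : i = 0
  · rw [if_neg (by omega), if_pos h0, pvProw_zero]
  · rw [if_neg (by omega), if_neg h0]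

lemma final_eq_alt (N : Int) : pvIst N N 0 = generate_pattern_matrix_alt N := by
  unfold pvIst generate_pattern_matrix_alt
  apply List.map_congr_left
  intro i hi
  rw [if_pos (PySem.List.mem_pyRange_one.mp hi).2]
  rfl

-- ===== VERDICT (by name: the statement is the Claim_ definition above) =====
theorem generate_pattern_matrix_spec : Claim_equal_generate_pattern_matrix := by
  intro N _
  unfold Spec_generate_pattern_matrix generate_pattern_matrix
  by_cases hN : N ≤ 0
  · rw [PySem.List.pyRange_one_eq_nil (by omega)]
    simp only [List.map_nil, List.foldl_nil]
    unfold generate_pattern_matrix_alt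
    rw [PySem.List.pyRange_one_eq_nil (by omega)]
    simp
  · rw [init_eq_ist N,
      outer_fold N N.toNat 0 le_rfl (by omega),
      final_eq_alt N]
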